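-- pv_equiv track=rewrite | github.com/voliroo/Uni-python-project | Custom-String-Methods/python_manual_str.py | ye_replace
-- ===== SOURCE A (Python) =====
-- def ye_replace(s , old , new , maxreplace = -1):
--     if not old:
--         return s
--     result = ""
--     position = 0
--     replaced = 0
--     while position < len(s):
--         if s[position:position + len(old)] == old and (maxreplace == -1 or replaced < maxreplace):
--             result += new
--             position += len(old)
--             replaced += 1
--         else:
--             result += s[position]
--             position += 1
--     return result
-- ===== SOURCE B (Python) =====
-- def ye_replace(s, old, new, maxreplace=-1):
--     if not old:
--         return s
--     parts = []
--     pos = 0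
--     replaced = 0
--     while maxreplace == -1 or replaced < maxreplace:
--         i = s.find(old, pos)
--         if i == -1:
--             break
--         parts.append(s[pos:i])
--         parts.append(new)
--         pos = i + len(old)
--         replaced += 1
--     parts.append(s[pos:])
--     return "".join(parts)
-- ===== Notes on version B (the rewrite author's own statement) =====
-- stated objective: faster
-- what changed: A rebuilds the string character by character, comparing a fresh len(old)-slice against old at every position; B jumps between occurrences with str.find (C-level substring search) and joins the untouched segments, so no per-position slice comparison remains.
import Mathlib
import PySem

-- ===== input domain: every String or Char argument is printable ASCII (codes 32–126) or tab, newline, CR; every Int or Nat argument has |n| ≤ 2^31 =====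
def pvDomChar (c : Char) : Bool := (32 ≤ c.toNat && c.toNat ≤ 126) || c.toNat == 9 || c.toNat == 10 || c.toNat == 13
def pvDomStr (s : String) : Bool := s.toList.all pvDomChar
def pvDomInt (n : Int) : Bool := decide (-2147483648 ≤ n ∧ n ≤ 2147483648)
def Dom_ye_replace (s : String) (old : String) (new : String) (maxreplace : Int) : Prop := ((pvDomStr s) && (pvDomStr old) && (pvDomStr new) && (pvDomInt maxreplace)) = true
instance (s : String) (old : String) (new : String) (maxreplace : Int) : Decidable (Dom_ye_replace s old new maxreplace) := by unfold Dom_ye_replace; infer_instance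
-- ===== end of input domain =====

-- B replaces A's per-character scan (a slice comparison at every position) by jumping from one
-- occurrence to the next with str.find and joining the untouched segments; objective: faster.

-- ===== PORT A =====
-- A's while loop, step for step: position/replaced/result are the loop state; the slice
-- comparison s[position:position+len(old)] == old is PySem.List.slice on the code points;
-- s[position] is s[pos] (in range by the loop guard, exact).  Called only with old ≠ "" (ho),
-- which Python's early `if not old: return s` guarantees; position grows by ≥ 1 each step.
def yeGoA (s o n : List Char) (ho : o ≠ []) (mr : Int) (pos : Nat) (replaced : Int)
    (result : List Char) : List Char :=
  if hpos : pos < s.length then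
    if PySem.List.slice s (some (pos : Int)) (some ((pos : Int) + (o.length : Int))) = o
        ∧ (mr = -1 ∨ replaced < mr) then
      yeGoA s o n ho mr (pos + o.length) (replaced + 1) (result ++ n)
    else
      yeGoA s o n ho mr (pos + 1) replaced (result ++ [s[pos]])
  else result
termination_by s.length - pos
decreasing_by
  · have := List.length_pos_of_ne_nil ho; omega
  · omega

def ye_replace (s : String) (old : String) (new : String) (maxreplace : Int) : String :=
  if h : old.toList = [] then s
  else String.ofList (yeGoA s.toList old.toList new.toList h maxreplace 0 0 [])

-- ===== PORT B =====
-- two facts B's termination argument cites: find(old, pos) is -1 once pos ≥ len(s), and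
-- otherwise it points at an occurrence at or after pos that fits inside s
lemma pv_findFrom_ge_len (s o : List Char) (ho : o ≠ []) (pos : Nat) (h : s.length ≤ pos) :
    PySem.Chars.findFrom s o (pos : Int) none = -1 := by
  by_cases hp : pos ≤ s.length
  · have hpe : pos = s.length := le_antisymm hp h
    rw [PySem.Chars.findFrom_natCast s o pos hp]
    have : PySem.Chars.find (List.drop pos s) o = -1 := by
      rw [PySem.Chars.find_eq_neg_one_iff]
      subst hpe
      simp [List.drop_length, List.infix_nil, ho]
    simp [this]
  · simp only [PySem.Chars.findFrom]
    simp
    omega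

lemma pv_goB_dec (s o : List Char) (ho : o ≠ []) (pos : Nat)
    (hne : PySem.Chars.findFrom s o (pos : Int) none ≠ -1) :
    pos ≤ (PySem.Chars.findFrom s o (pos : Int) none).toNat ∧
      (PySem.Chars.findFrom s o (pos : Int) none).toNat + o.length ≤ s.length := by
  have hp : pos ≤ s.length := by
    by_contra hc
    exact hne (pv_findFrom_ge_len s o ho pos (by omega))
  obtain ⟨h1, h2, _⟩ := PySem.Chars.findFrom_natCast_spec s o pos hp hne
  have hnn : (0:Int) ≤ PySem.Chars.findFrom s o (pos : Int) none :=
    le_trans (Int.natCast_nonneg pos) h1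
  have htn := Int.toNat_of_nonneg hnn
  have hge : pos ≤ (PySem.Chars.findFrom s o (pos : Int) none).toNat := by omega
  have hlen := h2.length_le
  simp [List.length_drop] at hlen
  have hol : 0 < o.length := List.length_pos_of_ne_nil ho
  exact ⟨hge, by omega⟩

-- B's while loop, step for step: s.find(old, pos) is PySem.Chars.findFrom; the appended pieces
-- s[pos:i], new, and the trailing s[pos:] are kept as slices; pos/replaced/parts are the loop
-- state (parts is kept already joined: "".join of the appended pieces = their concatenation).
-- Called only with old ≠ "" (ho), as in Source B.
def yeGoB (s o n : List Char) (ho : o ≠ []) (mr : Int) (pos : Nat) (replaced : Int)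
    (parts : List Char) : List Char :=
  if mr = -1 ∨ replaced < mr then
    if hi : PySem.Chars.findFrom s o (pos : Int) none = -1 then
      parts ++ PySem.List.slice s (some (pos : Int)) none
    else
      yeGoB s o n ho mr ((PySem.Chars.findFrom s o (pos : Int) none).toNat + o.length)
        (replaced + 1)
        (parts ++ PySem.List.slice s (some (pos : Int))
            (some (PySem.Chars.findFrom s o (pos : Int) none)) ++ n)
  else parts ++ PySem.List.slice s (some (pos : Int)) none
termination_by s.length + 1 - pos
decreasing_by
  obtain ⟨h1, h2⟩ := pv_goB_dec s o ho pos hi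
  have := List.length_pos_of_ne_nil ho
  omega

def ye_replace_alt (s : String) (old : String) (new : String) (maxreplace : Int) : String :=
  if h : old.toList = [] then s
  else String.ofList (yeGoB s.toList old.toList new.toList h maxreplace 0 0 [])

-- ===== PRECONDITION & SPEC =====
def Spec_ye_replace (s : String) (old : String) (new : String) (maxreplace : Int) (out : String) : Prop := out = ye_replace_alt s old new maxreplace
instance (s : String) (old : String) (new : String) (maxreplace : Int) (out : String) : Decidable (Spec_ye_replace s old new maxreplace out) := by unfold Spec_ye_replace; infer_instance

-- ===== CLAIM (what is proved, stated in full; the proofs are below) =====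
def Claim_equal_ye_replace : Prop := ∀ (s : String) (old : String) (new : String) (maxreplace : Int), Dom_ye_replace s old new maxreplace → Spec_ye_replace s old new maxreplace (ye_replace s old new maxreplace)

-- ===== LEMMAS AND PROOFS =====

-- A's slice test at position j succeeds iff o is a prefix of s.drop j
lemma pv_matchAt_iff (s o : List Char) (j : Nat) :
    PySem.List.slice s (some (j : Int)) (some ((j : Int) + (o.length : Int))) = o
      ↔ o <+: s.drop j := by
  rw [PySem.List.slice_natCast_add, List.prefix_iff_eq_take]
  exact ⟨fun h => h.symm, fun h => h.symm⟩

lemma pv_prefix_drop_infix {o t : List Char} (m : Nat) (h : o <+: List.drop m t) :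
    o <:+: t := h.isInfix.trans (List.drop_suffix m t).isInfix

-- A copies characters one by one over a stretch containing no occurrence of o
lemma pv_goA_copy (s o n : List Char) (ho : o ≠ []) (mr : Int) :
    ∀ (d pos : Nat) (replaced : Int) (result : List Char),
      pos + d ≤ s.length →
      (∀ j, pos ≤ j → j < pos + d → ¬ o <+: s.drop j) →
      yeGoA s o n ho mr pos replaced result
        = yeGoA s o n ho mr (pos + d) replaced (result ++ (s.drop pos).take d) := by
  intro d
  induction d with
  | zero => intro pos replaced result _ _; simp
  | succ d ih =>
    intro pos replaced result hlen hno
    have hpos : pos < s.length := by omega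
    have hcond : ¬ (PySem.List.slice s (some (pos : Int)) (some ((pos : Int) + (o.length : Int))) = o
        ∧ (mr = -1 ∨ replaced < mr)) := by
      intro ⟨hm, _⟩
      exact hno pos le_rfl (by omega) ((pv_matchAt_iff s o pos).mp hm)
    conv_lhs => rw [yeGoA]
    simp only [dif_pos hpos, if_neg hcond]
    rw [ih (pos + 1) replaced (result ++ [s[pos]]) (by omega)
      (fun j hj1 hj2 => hno j (by omega) (by omega))]
    have hdrop : s.drop pos = s[pos] :: s.drop (pos + 1) := (List.getElem_cons_drop hpos).symm
    rw [show pos + 1 + d = pos + (d + 1) by omega]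
    rw [hdrop, List.take_succ_cons]
    simp

-- with the budget exhausted A copies the whole tail unchanged
lemma pv_goA_nobudget (s o n : List Char) (ho : o ≠ []) (mr : Int) (hmr : mr ≠ -1) :
    ∀ (k pos : Nat) (replaced : Int) (result : List Char),
      s.length - pos ≤ k → ¬ replaced < mr →
      yeGoA s o n ho mr pos replaced result = result ++ s.drop pos := by
  intro k
  induction k with
  | zero =>
    intro pos replaced result hk hb
    rw [yeGoA]
    rw [dif_neg (by omega)]
    rw [List.drop_eq_nil_of_le (by omega), List.append_nil]
  | succ k ih =>
    intro pos replaced result hk hb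
    by_cases hpos : pos < s.length
    · have hcond : ¬ (PySem.List.slice s (some (pos : Int)) (some ((pos : Int) + (o.length : Int))) = o
          ∧ (mr = -1 ∨ replaced < mr)) := by
        intro ⟨_, h⟩
        rcases h with h | h
        · exact hmr h
        · exact hb h
      conv_lhs => rw [yeGoA]
      simp only [dif_pos hpos, if_neg hcond]
      rw [ih (pos + 1) replaced (result ++ [s[pos]]) (by omega) hb]
      rw [(List.getElem_cons_drop hpos).symm]
      simp
    · rw [yeGoA, dif_neg hpos]
      rw [List.drop_eq_nil_of_le (by omega), List.append_nil]

-- the loops agree from any position, budget and accumulator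
lemma pv_main (s o n : List Char) (ho : o ≠ []) (mr : Int) :
    ∀ (k pos : Nat) (replaced : Int) (result : List Char),
      s.length - pos ≤ k →
      yeGoA s o n ho mr pos replaced result = yeGoB s o n ho mr pos replaced result := by
  intro k
  induction k with
  | zero =>
    intro pos replaced result hk
    have hf := pv_findFrom_ge_len s o ho pos (by omega)
    rw [yeGoA, dif_neg (by omega), yeGoB]
    by_cases hb : mr = -1 ∨ replaced < mr
    · rw [if_pos hb, dif_pos hf, PySem.List.slice_from s (Int.natCast_nonneg pos),
        Int.toNat_natCast, List.drop_eq_nil_of_le (by omega), List.append_nil]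
    · rw [if_neg hb, PySem.List.slice_from s (Int.natCast_nonneg pos),
        Int.toNat_natCast, List.drop_eq_nil_of_le (by omega), List.append_nil]
  | succ k ih =>
    intro pos replaced result hk
    by_cases hb : mr = -1 ∨ replaced < mr
    · by_cases hi : PySem.Chars.findFrom s o (pos : Int) none = -1
      · -- no further occurrence: both return result ++ s.drop pos
        rw [yeGoB, if_pos hb, dif_pos hi, PySem.List.slice_from s (Int.natCast_nonneg pos),
          Int.toNat_natCast]
        by_cases hp : pos ≤ s.length
        · have hninf : ¬ o <:+: List.drop pos s :=
            (PySem.Chars.findFrom_natCast_eq_neg_one_iff s o pos hp).mp hi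
          have hno : ∀ j, pos ≤ j → j < pos + (s.length - pos) → ¬ o <+: List.drop j s := by
            intro j hj _ hpre
            have : o <+: List.drop (j - pos) (List.drop pos s) := by
              rw [List.drop_drop, show pos + (j - pos) = j by omega]
              exact hpre
            exact hninf (pv_prefix_drop_infix _ this)
          rw [pv_goA_copy s o n ho mr (s.length - pos) pos replaced result (by omega) hno]
          rw [yeGoA, dif_neg (by omega)]
          rw [List.take_of_length_le (by simp)]
        · rw [yeGoA, dif_neg (by omega)]
          rw [List.drop_eq_nil_of_le (by omega), List.append_nil]
      · -- next occurrence at q := (find).toNat: A copies up to q, both replace, recurse at q+|o|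
        obtain ⟨hq1, hq2⟩ := pv_goB_dec s o ho pos hi
        have hol : 0 < o.length := List.length_pos_of_ne_nil ho
        have hp : pos ≤ s.length := by omega
        obtain ⟨h1, h2, h3⟩ := PySem.Chars.findFrom_natCast_spec s o pos hp hi
        have hnn : (0:Int) ≤ PySem.Chars.findFrom s o (pos : Int) none :=
          le_trans (Int.natCast_nonneg pos) h1
        conv_rhs => rw [yeGoB]
        rw [if_pos hb, dif_neg hi]
        rw [pv_goA_copy s o n ho mr ((PySem.Chars.findFrom s o (pos : Int) none).toNat - pos)
          pos replaced result (by omega) (fun j hj1 hj2 => h3 j hj1 (by omega))]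
        rw [Nat.add_sub_cancel' hq1]
        conv_lhs => rw [yeGoA]
        rw [dif_pos (by omega), if_pos ⟨(pv_matchAt_iff s o _).mpr h2, hb⟩]
        rw [ih _ (replaced + 1) _ (by omega)]
        rw [PySem.List.slice_toNat s (Int.natCast_nonneg pos) hnn, Int.toNat_natCast]
    · -- budget exhausted: both return result ++ s.drop pos
      rw [yeGoB, if_neg hb, PySem.List.slice_from s (Int.natCast_nonneg pos), Int.toNat_natCast]
      exact pv_goA_nobudget s o n ho mr (fun h => hb (Or.inl h)) s.length pos replaced result
        (by omega) (fun h => hb (Or.inr h))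

-- ===== VERDICT (by name: the statement is the Claim_ definition above) =====
theorem ye_replace_spec : Claim_equal_ye_replace := by
  intro s old new maxreplace _
  unfold Spec_ye_replace ye_replace ye_replace_alt
  by_cases h : old.toList = []
  · simp [h]
  · simp only [dif_neg h]
    exact congrArg String.ofList
      (pv_main s.toList old.toList new.toList h maxreplace s.toList.length 0 0 [] (by omega))
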